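-- pv_equiv track=rewrite | github.com/GabrieleAraujo/sorting_algorithm_analysis | sorting_algorithms.py | worst_case_merge
-- ===== SOURCE A (Python) =====
-- def worst_case_merge(arr):
--     if len(arr) <= 1:  # O(1)
--         return arr
--     if len(arr) == 2:  # O(1)
--         return [arr[1], arr[0]]  # O(1)
--     m = (len(arr) + 1) // 2  # O(1)
--     left = worst_case_merge(arr[:m])  # T(n/2)
--     right = worst_case_merge(arr[m:])  # T(n/2)
--     return left + right  # O(n)
-- ===== SOURCE B (Python) =====
-- def worst_case_merge(arr):
--     n = len(arr)
--     if n <= 1: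
--         return arr
--     out = []
--     stack = [(0, n)]
--     while stack:
--         lo, hi = stack.pop()
--         size = hi - lo
--         if size == 1:
--             out.append(arr[lo])
--         elif size == 2:
--             out.append(arr[lo + 1])
--             out.append(arr[lo])
--         else:
--             mid = lo + (size + 1) // 2
--             stack.append((mid, hi))
--             stack.append((lo, mid))
--     return out
-- ===== Notes on version B (the rewrite author's own statement) =====
-- stated objective: alternative
-- what changed: Replaced A's recursive slice-and-concatenate (building sublists at every level) by a single iterative loop over an explicit stack of (lo, hi) index pairs that emits the swapped leaf pairs directly into one output list, with no slicing or recursion.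
import Mathlib
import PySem

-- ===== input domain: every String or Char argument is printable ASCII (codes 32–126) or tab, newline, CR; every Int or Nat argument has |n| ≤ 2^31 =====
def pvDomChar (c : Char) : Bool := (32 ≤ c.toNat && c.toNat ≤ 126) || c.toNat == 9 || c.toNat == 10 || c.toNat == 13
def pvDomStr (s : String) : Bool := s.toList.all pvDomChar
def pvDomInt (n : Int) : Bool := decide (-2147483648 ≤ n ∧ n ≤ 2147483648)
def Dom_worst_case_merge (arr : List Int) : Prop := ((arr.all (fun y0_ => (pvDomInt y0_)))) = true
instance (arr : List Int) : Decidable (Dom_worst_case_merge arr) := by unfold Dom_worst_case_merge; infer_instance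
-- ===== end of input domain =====

-- B replaces A's recursive slice-and-concatenate scheme by a single iterative pass over an
-- explicit stack of index segments, emitting directly into one output list.

-- ===== PORT A =====
-- A's recursion, with a fuel counter as a pure totality guard (arr.length fuel always suffices:
-- both recursive calls are on strictly shorter slices, so the 0 branch is never reached)
def wcmA : Nat → List Int → List Int
  | 0, arr => arr
  | fuel + 1, arr =>
    if arr.length ≤ 1 then arr
    else if arr.length = 2 then
      [(PySem.List.pyGet? arr 1).getD 0, (PySem.List.pyGet? arr 0).getD 0]  -- indices 0,1 in range here
    else
      let m : Nat := (arr.length + 1) / 2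
      wcmA fuel (PySem.List.slice arr none (some (m : Int))) ++
        wcmA fuel (PySem.List.slice arr (some (m : Int)) none)

def worst_case_merge (arr : List Int) : List Int := wcmA arr.length arr

-- ===== PORT B =====
-- the while loop of Source B, with a fuel counter as a pure totality guard (the caller's fuel always
-- suffices); the list's head is the stack's top (python pushes (mid, hi) then (lo, mid))
def wcmLoop (arr : List Int) : Nat → List (Nat × Nat) → List Int → List Int
  | 0, _, out => out
  | fuel + 1, st, out =>
    match st with
    | [] => out
    | (lo, hi) :: st =>
      let size := hi - lo
      if size = 1 then wcmLoop arr fuel st (out ++ [arr.getD lo 0])  -- indices in range: segments ⊆ [0, n)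
      else if size = 2 then wcmLoop arr fuel st (out ++ [arr.getD (lo + 1) 0, arr.getD lo 0])
      else if 2 < size then
        let mid := lo + (size + 1) / 2
        wcmLoop arr fuel ((lo, mid) :: (mid, hi) :: st) out
      else wcmLoop arr fuel st out  -- size = 0: unreachable (all pushed segments are non-empty)

def worst_case_merge_alt (arr : List Int) : List Int :=
  if arr.length ≤ 1 then arr
  else wcmLoop arr (4 * arr.length) [(0, arr.length)] []

-- ===== PRECONDITION & SPEC =====
def Spec_worst_case_merge (arr : List Int) (out : List Int) : Prop := out = worst_case_merge_alt arr
instance (arr : List Int) (out : List Int) : Decidable (Spec_worst_case_merge arr out) := by unfold Spec_worst_case_merge; infer_instance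

-- ===== CLAIM (what is proved, stated in full; the proofs are below) =====
def Claim_equal_worst_case_merge : Prop := ∀ (arr : List Int), Dom_worst_case_merge arr → Spec_worst_case_merge arr (worst_case_merge arr)

-- ===== LEMMAS AND PROOFS =====

-- weight of a stack of segments, used only to bound the loop's iteration count
def pvSegW (p : Nat × Nat) : Nat := 2 * (p.2 - p.1) - 1
def pvStackW (st : List (Nat × Nat)) : Nat := (st.map pvSegW).sum

-- A's result does not depend on the fuel, as long as it is at least arr.length
lemma wcmA_congr (f : Nat) : ∀ (g : Nat) (arr : List Int), arr.length ≤ f → arr.length ≤ g →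
    wcmA f arr = wcmA g arr := by
  induction f with
  | zero =>
    intro g arr hf _
    cases g with
    | zero => rfl
    | succ g => simp only [wcmA]; rw [if_pos (by omega)]
  | succ f ih =>
    intro g arr hf hg
    cases g with
    | zero => simp only [wcmA]; rw [if_pos (by omega)]
    | succ g =>
      simp only [wcmA]
      by_cases h1 : arr.length ≤ 1
      · rw [if_pos h1, if_pos h1]
      by_cases h2 : arr.length = 2
      · rw [if_neg h1, if_neg h1, if_pos h2, if_pos h2]
      · rw [if_neg h1, if_neg h1, if_neg h2, if_neg h2,
          PySem.List.slice_to_natCast, PySem.List.slice_from_natCast]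
        congr 1
        · exact ih g _ (by simp; omega) (by simp; omega)
        · exact ih g _ (by simp; omega) (by simp; omega)

lemma take_one_drop (arr : List Int) (lo : Nat) (h : lo < arr.length) :
    (arr.drop lo).take 1 = [arr.getD lo 0] := by
  rw [List.drop_eq_getElem_cons h, List.take_succ_cons, List.take_zero,
    List.getD_eq_getElem arr 0 h]

lemma take_two_drop (arr : List Int) (lo : Nat) (h : lo + 1 < arr.length) :
    (arr.drop lo).take 2 = [arr.getD lo 0, arr.getD (lo + 1) 0] := by
  rw [List.drop_eq_getElem_cons (by omega : lo < arr.length), List.take_succ_cons,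
    List.drop_eq_getElem_cons h, List.take_succ_cons, List.take_zero,
    List.getD_eq_getElem arr 0 (by omega : lo < arr.length), List.getD_eq_getElem arr 0 h]

-- A on a two-element list swaps it
lemma wcm_two (a b : Int) : worst_case_merge [a, b] = [b, a] := by
  simp [worst_case_merge, wcmA, PySem.List.pyGet?, PySem.List.pyIdx?]

-- A on a segment of size > 2 splits at its midpoint
lemma wcm_split (arr : List Int) (lo hi mid : Nat) (hm : mid = lo + (hi - lo + 1) / 2)
    (h2 : hi ≤ arr.length) (h3 : 2 < hi - lo) :
    worst_case_merge ((arr.drop lo).take (hi - lo)) =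
      worst_case_merge ((arr.drop lo).take (mid - lo)) ++
        worst_case_merge ((arr.drop mid).take (hi - mid)) := by
  have hlen : ((arr.drop lo).take (hi - lo)).length = hi - lo := by simp; omega
  obtain ⟨k, hk⟩ : ∃ k, hi - lo = k + 1 := ⟨hi - lo - 1, by omega⟩
  rw [worst_case_merge, hlen, hk]
  have hlen' : ((arr.drop lo).take (k + 1)).length = k + 1 := by simp; omega
  simp only [wcmA]
  rw [if_neg (by rw [hlen']; omega), if_neg (by rw [hlen']; omega), hlen',
    PySem.List.slice_to_natCast, PySem.List.slice_from_natCast,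
    List.take_take, List.drop_take, List.drop_drop,
    show min ((k + 1 + 1) / 2) (k + 1) = mid - lo by omega,
    show k + 1 - (k + 1 + 1) / 2 = hi - mid by omega,
    show lo + (k + 1 + 1) / 2 = mid by omega]
  congr 1
  · rw [worst_case_merge]
    exact wcmA_congr k _ _ (by simp; omega) (by simp)
  · rw [worst_case_merge]
    exact wcmA_congr k _ _ (by simp; omega) (by simp)

-- the loop emits, segment by segment, exactly what A computes on each segment
lemma wcmLoop_eq (arr : List Int) (f : Nat) : ∀ (st : List (Nat × Nat)) (out : List Int),
    (∀ p ∈ st, p.1 < p.2 ∧ p.2 ≤ arr.length) → 2 * pvStackW st + st.length ≤ f →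
    wcmLoop arr f st out =
      out ++ (st.map (fun p => worst_case_merge ((arr.drop p.1).take (p.2 - p.1)))).flatten := by
  induction f with
  | zero =>
    intro st out _ hfuel
    have : st = [] := by cases st <;> simp_all
    subst this
    simp [wcmLoop]
  | succ f ih =>
    intro st out h hfuel
    match st with
    | [] => simp [wcmLoop]
    | (lo, hi) :: st =>
      have hb := h (lo, hi) (by simp)
      have hW : pvStackW ((lo, hi) :: st) = (2 * (hi - lo) - 1) + pvStackW st := by
        simp [pvStackW, pvSegW]
      simp only [List.length_cons] at hfuel
      simp only [wcmLoop]
      by_cases h1 : hi - lo = 1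
      · rw [if_pos h1, ih st _ (fun p hp => h p (by simp [hp])) (by omega)]
        have he : hi = lo + 1 := by omega
        subst he
        simp only [List.map_cons, List.flatten_cons, show lo + 1 - lo = 1 by omega,
          take_one_drop arr lo (by omega)]
        rw [show worst_case_merge [arr.getD lo 0] = [arr.getD lo 0] by
          simp [worst_case_merge, wcmA]]
        simp
      by_cases h2 : hi - lo = 2
      · rw [if_neg h1, if_pos h2, ih st _ (fun p hp => h p (by simp [hp])) (by omega)]
        have he : hi = lo + 2 := by omega
        subst he
        simp only [List.map_cons, List.flatten_cons, show lo + 2 - lo = 2 by omega,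
          take_two_drop arr lo (by omega), wcm_two]
        simp
      · have h3 : 2 < hi - lo := by omega
        rw [if_neg h1, if_neg h2, if_pos h3]
        have hmid : lo < lo + (hi - lo + 1) / 2 ∧ lo + (hi - lo + 1) / 2 < hi := by omega
        rw [ih _ _ ?_ ?_]
        · simp only [List.map_cons, List.flatten_cons]
          rw [wcm_split arr lo hi (lo + (hi - lo + 1) / 2) rfl hb.2 h3]
          simp
        · intro p hp
          simp only [List.mem_cons] at hp
          rcases hp with hp | hp | hp
          · subst hp; constructor <;> simp <;> omega
          · subst hp; constructor <;> simp <;> omega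
          · exact h p (List.mem_cons_of_mem _ hp)
        · have hW' : pvStackW ((lo, lo + (hi - lo + 1) / 2) :: (lo + (hi - lo + 1) / 2, hi) :: st) =
              (2 * ((hi - lo + 1) / 2) - 1) + ((2 * (hi - (lo + (hi - lo + 1) / 2)) - 1) + pvStackW st) := by
            simp [pvStackW, pvSegW]
          simp only [List.length_cons] at hfuel ⊢
          omega

-- ===== VERDICT (by name: the statement is the Claim_ definition above) =====
theorem worst_case_merge_spec : Claim_equal_worst_case_merge := by
  intro arr _
  unfold Spec_worst_case_merge worst_case_merge_alt
  by_cases h : arr.length ≤ 1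
  · rw [if_pos h, worst_case_merge]
    cases arr with
    | nil => rfl
    | cons a t => cases t with
      | nil => rfl
      | cons b t => simp at h
  · rw [if_neg h,
      wcmLoop_eq arr _ _ _ (by intro p hp; simp at hp; subst hp; simp; omega)
        (by simp [pvStackW, pvSegW]; omega)]
    simp [worst_case_merge]
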